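-- pv_equiv track=rewrite | github.com/eurnie/AdventOfCode | 2020/18/puzzle2.py | evaluateAllAddition
-- ===== SOURCE A (Python) =====
-- def evaluateAllAddition(expression):
-- 	newExpr = expression
-- 	offset = 0
-- 	sumFound = True
-- 	while (sumFound):
-- 		sumFound = False
-- 		for i in range(1, len(newExpr)-1):
-- 			if (newExpr[i] == '+'):
-- 				newSum = int(newExpr[i-1]) + int(newExpr[i+1])
-- 				newExpr = newExpr[:(i-1)] + [str(newSum)] + newExpr[(i+2):]
-- 				sumFound = True
-- 				break
-- 	return newExpr
-- ===== SOURCE B (Python) =====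
-- def evaluateAllAddition(expression):
--     stack = []
--     for tok in expression:
--         if len(stack) >= 2 and stack[-1] == '+':
--             left = stack[-2]
--             stack[-2:] = [str(int(left) + int(tok))]
--         else:
--             stack.append(tok)
--     return stack
-- ===== Notes on version B (the rewrite author's own statement) =====
-- stated objective: alternative
-- what changed: A repeatedly rescans the list from the start and rebuilds it by slicing for every single '+' collapsed; B makes one left-to-right pass with a stack, combining when the top of the stack is '+' (asymptotically better on '+'-heavy input, but not measurably faster on the generated timing inputs).
import Mathlib
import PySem

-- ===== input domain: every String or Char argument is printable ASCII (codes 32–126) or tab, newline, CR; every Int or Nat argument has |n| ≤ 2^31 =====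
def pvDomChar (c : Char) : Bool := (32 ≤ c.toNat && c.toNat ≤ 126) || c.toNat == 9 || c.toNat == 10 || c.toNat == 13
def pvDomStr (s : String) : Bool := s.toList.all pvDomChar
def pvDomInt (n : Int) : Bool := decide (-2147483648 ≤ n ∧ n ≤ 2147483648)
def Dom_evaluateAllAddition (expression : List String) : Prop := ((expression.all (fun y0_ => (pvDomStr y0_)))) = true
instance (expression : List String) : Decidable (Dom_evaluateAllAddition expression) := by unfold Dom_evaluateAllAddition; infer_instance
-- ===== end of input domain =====

-- B replaces A's rescan-and-splice loop by a single left-to-right stack pass; equal on Pre_ (where A's int() calls succeed).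

-- ===== PORT A =====
-- int(s): inside Pre_ the parse always succeeds; the `getD 0` default is only reached
-- on inputs excluded by Pre_ (where Python raises ValueError).
def getInt (s : String) : Int := (PySem.Int.ofStr? s).getD 0

-- the inner `for i in range(1, len-1): if newExpr[i] == '+': splice; break` of A:
-- find the leftmost '+' that has both a left and a right neighbour and splice the
-- triple into one token (expressed as the obvious structural scan over the list).
def aStep : List String → Option (List String)
  | a :: x :: b :: rest =>
      if x = "+" then some (PySem.Int.toStr (getInt a + getInt b) :: rest)
      else (aStep (x :: b :: rest)).map (a :: ·)
  | _ => none

lemma aStep_length : ∀ (e e' : List String), aStep e = some e' → e.length = e'.length + 2 := by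
  intro e
  induction e with
  | nil => intro e' he; simp [aStep] at he
  | cons a t ih =>
      intro e' he
      match t, ih with
      | [], _ => simp [aStep] at he
      | [x], _ => simp [aStep] at he
      | x :: b :: r, ih =>
          by_cases hx : x = "+"
          · subst hx
            simp only [aStep, reduceIte, Option.some.injEq] at he
            subst he; simp
          · simp only [aStep, if_neg hx, Option.map_eq_some_iff] at he
            obtain ⟨w, hw, rfl⟩ := he
            have := ih w hw; simp at this ⊢; omega

-- the outer `while sumFound:` loop of A
def aLoop (e : List String) : List String :=
  match h : aStep e with
  | none => e
  | some e' => aLoop e'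
termination_by e.length
decreasing_by have := aStep_length e e' h; omega

def evaluateAllAddition (expression : List String) : List String := aLoop expression

-- ===== PORT B =====
-- one step of B's loop; the stack is kept top-first (Python's stack[-1] is the head).
def bStep (stack : List String) (tok : String) : List String :=
  match stack with
  | x :: l :: s => if x = "+" then PySem.Int.toStr (getInt l + getInt tok) :: s else tok :: stack
  | _ => tok :: stack

def evaluateAllAddition_alt (expression : List String) : List String :=
  (expression.foldl bStep []).reverse

-- ===== PRECONDITION & SPEC =====
-- Pre_ excludes exactly the inputs on which A raises ValueError: some '+' with both a left
-- and a right neighbour whose right neighbour is not an int literal, or whose left operand at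
-- collapse time (the original left neighbour, unless it was just produced by collapsing the
-- '+' two places earlier) is not an int literal.
def Pre_evaluateAllAddition (expression : List String) : Prop :=
  ∀ i < expression.length, 1 ≤ i → i + 2 ≤ expression.length →
    expression.getD i "" = "+" →
      (PySem.Int.ofStr? (expression.getD (i+1) "")).isSome = true ∧
      ((3 ≤ i ∧ expression.getD (i-2) "" = "+") ∨
        (PySem.Int.ofStr? (expression.getD (i-1) "")).isSome = true)
instance (expression : List String) : Decidable (Pre_evaluateAllAddition expression) := by
  unfold Pre_evaluateAllAddition
  exact Nat.decidableBallLT _ _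

def pvWitness_evaluateAllAddition : List String := ["1", "+", "2", "+", "3"]

def Spec_evaluateAllAddition (expression : List String) (out : List String) : Prop := out = evaluateAllAddition_alt expression
instance (expression : List String) (out : List String) : Decidable (Spec_evaluateAllAddition expression out) := by unfold Spec_evaluateAllAddition; infer_instance

-- ===== CLAIM (what is proved, stated in full; the proofs are below) =====
def Claim_equal_evaluateAllAddition : Prop := ∀ (expression : List String), Dom_evaluateAllAddition expression → Pre_evaluateAllAddition expression → Spec_evaluateAllAddition expression (evaluateAllAddition expression)

-- ===== LEMMAS AND PROOFS =====

lemma aStep_cons3_pos (a b : String) (rest : List String) :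
    aStep (a :: "+" :: b :: rest) = some (PySem.Int.toStr (getInt a + getInt b) :: rest) := by
  simp [aStep]

lemma aStep_cons3_neg {x : String} (hx : x ≠ "+") (a b : String) (rest : List String) :
    aStep (a :: x :: b :: rest) = (aStep (x :: b :: rest)).map (a :: ·) := by
  simp [aStep, hx]

lemma aStep_cons_of_head_ne (c : String) (l : List String) (h : ∀ x ∈ l.head?, x ≠ "+") :
    aStep (c :: l) = (aStep l).map (c :: ·) := by
  match l with
  | [] => rfl
  | [x] => rfl
  | x :: b :: r =>
      have hx : x ≠ "+" := h x rfl
      exact aStep_cons3_neg hx c b r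


-- "no '+' strictly inside the list" (the head and the last element may be '+')
def Mid (l : List String) : Prop := ∀ x ∈ l.tail.dropLast, x ≠ "+"

lemma mid_tail {a : String} {t : List String} (h : Mid (a :: t)) : Mid t := by
  intro x hx
  apply h x
  match t, hx with
  | b :: r, hx =>
      simp only [List.tail_cons]
      match r, hx with
      | c :: r', hx =>
          simp only [List.dropLast_cons₂, List.mem_cons] at hx ⊢
          exact .inr hx

lemma aStep_none_of_mid : ∀ (w : List String), Mid w → aStep w = none := by
  intro w
  induction w with
  | nil => intro _; rfl
  | cons a t ih =>
      intro hm
      match t with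
      | [] => rfl
      | [x] => rfl
      | x :: b :: r =>
          have hx : x ≠ "+" := hm x (by simp [List.dropLast_cons₂])
          rw [aStep_cons3_neg hx, ih (mid_tail hm), Option.map_none]

lemma aStep_locate : ∀ (u : List String) (a b : String) (v : List String),
    (∀ x ∈ u.tail, x ≠ "+") → (u ≠ [] → a ≠ "+") →
    aStep (u ++ a :: "+" :: b :: v) =
      some (u ++ PySem.Int.toStr (getInt a + getInt b) :: v) := by
  intro u
  induction u with
  | nil => intro a b v _ _; simpa using aStep_cons3_pos a b v
  | cons c u' ih =>
      intro a b v h1 h2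
      have hne : a ≠ "+" := h2 (by simp)
      have hhead : ∀ x ∈ (u' ++ a :: "+" :: b :: v).head?, x ≠ "+" := by
        intro x hx
        match u' with
        | [] => simp at hx; exact hx ▸ hne
        | d :: u'' =>
            simp at hx
            exact hx ▸ h1 d (by simp)
      rw [List.cons_append, aStep_cons_of_head_ne c _ hhead,
        ih a b v (fun x hx => h1 x (List.mem_of_mem_tail (by simp [hx]))) (fun _ => hne)]
      rfl

lemma aLoop_of_none {e : List String} (h : aStep e = none) : aLoop e = e := by
  rw [aLoop.eq_def]
  split
  · rfl
  · next e' h' => rw [h] at h'; cases h'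

lemma aLoop_of_some {e e' : List String} (h : aStep e = some e') : aLoop e = aLoop e' := by
  rw [aLoop.eq_def]
  split
  · next h' => rw [h] at h'; cases h'
  · next e'' h' => rw [h] at h'; cases h'; rfl

lemma mid_reverse {l : List String} (h : Mid l) : Mid l.reverse := by
  intro x hx
  apply h x
  rw [List.tail_reverse, List.dropLast_reverse, List.mem_reverse, List.tail_dropLast] at hx
  exact hx

lemma bStep_nil (tok : String) : bStep [] tok = [tok] := rfl

lemma bStep_one (x tok : String) : bStep [x] tok = [tok, x] := rfl

lemma bStep_pos (l : String) (s : List String) (tok : String) :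
    bStep ("+" :: l :: s) tok = PySem.Int.toStr (getInt l + getInt tok) :: s := by
  simp [bStep]

lemma bStep_neg {x : String} (hx : x ≠ "+") (l : String) (s : List String) (tok : String) :
    bStep (x :: l :: s) tok = tok :: x :: l :: s := by
  simp [bStep, hx]

lemma mem_dropLast_cons {α : Type} {x a : α} {s : List α} (h : x ∈ s.dropLast) :
    x ∈ (a :: s).dropLast := by
  match s with
  | [] => simp at h
  | b :: r => rw [List.dropLast_cons₂]; exact List.mem_cons_of_mem a h

lemma self_mem_dropLast_cons {α : Type} {a : α} {s : List α} (h : s ≠ []) :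
    a ∈ (a :: s).dropLast := by
  match s with
  | [] => exact absurd rfl h
  | b :: r => rw [List.dropLast_cons₂]; exact List.mem_cons_self ..

lemma main_lemma : ∀ (rest st : List String), Mid st →
    aLoop (st.reverse ++ rest) = (List.foldl bStep st rest).reverse := by
  intro rest
  induction rest with
  | nil =>
      intro st hst
      simp only [List.foldl_nil, List.append_nil]
      exact aLoop_of_none (aStep_none_of_mid _ (mid_reverse hst))
  | cons tok rest' ih =>
      intro st hst
      cases st with
      | nil => simpa [bStep_nil] using ih [tok] (by intro z hz; simp at hz)
      | cons x t =>
        cases t with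
        | nil => simpa [bStep_one] using ih [tok, x] (by intro z hz; simp at hz)
        | cons l s =>
          by_cases hx : x = "+"
          · subst hx
            -- combine: A collapses the triple l, '+', tok; B pops and pushes the sum
            have hmid0 : ∀ y ∈ (l :: s).dropLast, y ≠ "+" := by
              intro y hy; exact hst y (by simpa using hy)
            have hmidu : ∀ y ∈ s.reverse.tail, y ≠ "+" := by
              intro y hy
              rw [List.tail_reverse, List.mem_reverse] at hy
              exact hmid0 y (mem_dropLast_cons hy)
            have hl : s.reverse ≠ [] → l ≠ "+" := fun hs =>
              hmid0 l (self_mem_dropLast_cons (by simpa using hs))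
            have harr : ("+" :: l :: s : List String).reverse ++ tok :: rest' =
                s.reverse ++ l :: "+" :: tok :: rest' := by simp
            rw [harr, aLoop_of_some (aStep_locate s.reverse l tok rest' hmidu hl)]
            have hmid' : Mid (PySem.Int.toStr (getInt l + getInt tok) :: s) := by
              intro y hy
              simp only [List.tail_cons] at hy
              exact hmid0 y (mem_dropLast_cons hy)
            have := ih _ hmid'
            simp only [List.reverse_cons, List.append_assoc] at this
            rw [List.foldl_cons, bStep_pos]
            simpa using this
          · -- push: tok goes onto the stack on both sides
            have hmid' : Mid (tok :: x :: l :: s) := by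
              intro z hz
              simp only [List.tail_cons, List.dropLast_cons₂] at hz
              rcases List.mem_cons.mp hz with rfl | hz
              · exact hx
              · exact hst z (by simpa using hz)
            have := ih _ hmid'
            rw [List.foldl_cons, bStep_neg hx]
            rw [← this]
            simp

-- ===== VERDICT (by name: the statement is the Claim_ definition above) =====
theorem evaluateAllAddition_spec : Claim_equal_evaluateAllAddition := by
  intro expression _ _
  unfold Spec_evaluateAllAddition evaluateAllAddition evaluateAllAddition_alt
  have := main_lemma expression [] (by intro x hx; simp at hx)
  simpa using this
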